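-- pv_equiv track=rewrite | github.com/MC-and-his-Agents/Syvert | .loom/bin/loom_check.py | github_slug
-- ===== SOURCE A (Python) =====
-- import unicodedata
--
-- def github_slug(text: str) -> str:
--     text = unicodedata.normalize("NFKD", text).lower().strip()
--     slug_chars: list[str] = []
--     last_was_dash = False
--     for char in text:
--         if char.isspace() or char == "-":
--             if slug_chars and not last_was_dash:
--                 slug_chars.append("-")
--                 last_was_dash = True
--             continue
--
--         category = unicodedata.category(char)
--         if category[0] in {"L", "N"} or category == "Mn":
--             slug_chars.append(char)
--             last_was_dash = False
--
--     return "".join(slug_chars).strip("-")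
-- ===== SOURCE B (Python) =====
-- import unicodedata
--
--
-- def _is_sep(c: str) -> bool:
--     return c.isspace() or c == "-"
--
--
-- def _keep(c: str) -> bool:
--     cat = unicodedata.category(c)
--     return cat[0] in ("L", "N") or cat == "Mn"
--
--
-- def github_slug(text: str) -> str:
--     text = unicodedata.normalize("NFKD", text).lower().strip()
--     words: list[str] = []
--     i, n = 0, len(text)
--     while i < n:
--         if _is_sep(text[i]):
--             i += 1
--             continue
--         buf: list[str] = []
--         while i < n and not _is_sep(text[i]):
--             if _keep(text[i]):
--                 buf.append(text[i])
--             i += 1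
--         if buf:
--             words.append("".join(buf))
--     return "-".join(words)
-- ===== Notes on version B (the rewrite author's own statement) =====
-- stated objective: alternative
-- what changed: B replaces A's single char-by-char pass with a slug buffer and last_was_dash bookkeeping (plus a final strip of dashes) by a two-level scan: an outer loop skips separators, an inner loop consumes a whole word block filtering its kept characters, and the nonempty words are joined with dashes.
import Mathlib
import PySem

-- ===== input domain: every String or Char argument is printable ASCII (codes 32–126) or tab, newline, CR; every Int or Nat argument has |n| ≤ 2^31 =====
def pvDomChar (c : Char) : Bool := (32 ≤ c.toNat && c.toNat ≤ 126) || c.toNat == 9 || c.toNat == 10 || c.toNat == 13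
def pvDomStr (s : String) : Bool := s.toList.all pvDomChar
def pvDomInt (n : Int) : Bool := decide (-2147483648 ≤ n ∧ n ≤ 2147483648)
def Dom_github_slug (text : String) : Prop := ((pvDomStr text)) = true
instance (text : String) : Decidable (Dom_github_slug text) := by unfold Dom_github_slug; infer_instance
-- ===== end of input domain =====

-- B scans the text as a two-level loop — skip separators, then consume a whole word block
-- filtering its kept characters — and joins the words with dashes, instead of A's single
-- char-by-char buffer with last_was_dash bookkeeping and a final strip of dashes; objective: alternative decomposition.

-- ===== PORT A =====
-- unicodedata.category(c)[0] ∈ {L,N} or category = 'Mn': on the printable-ASCII domain this is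
-- exactly "letter or digit" (no ASCII char has category Mn); exact on Dom.
def githubKeep (c : Char) : Bool := c.isAlpha || c.isDigit

-- char.isspace() or char == '-'
def githubSep (c : Char) : Bool := PySem.Chars.isspace c || c == '-'

def githubStepA (st : List Char × Bool) (c : Char) : List Char × Bool :=
  if githubSep c then
    if !st.1.isEmpty && !st.2 then (st.1 ++ ['-'], true) else st
  else if githubKeep c then (st.1 ++ [c], false) else st

def github_slug (text : String) : String :=
  -- unicodedata.normalize("NFKD", ·) is the identity on the ASCII domain
  let t := PySem.Chars.strip (PySem.Chars.lower text.toList)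
  let st := t.foldl githubStepA ([], false)
  String.ofList (PySem.Chars.stripChars st.1 ['-'])

-- ===== PORT B =====
-- B's inner while loop: consume the word block at the head (filtering kept chars), return (word, rest)
def ghWord : List Char → List Char × List Char
  | [] => ([], [])
  | c :: t =>
    if githubSep c then ([], c :: t)
    else
      let p := ghWord t
      (if githubKeep c then c :: p.1 else p.1, p.2)

-- termination measure for B's outer loop
lemma ghWord_rest_le : ∀ t : List Char, (ghWord t).2.length ≤ t.length := by
  intro t
  induction t with
  | nil => simp [ghWord]
  | cons c t ih =>
    simp only [ghWord]
    split
    · simp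
    · simpa using Nat.le_succ_of_le ih

-- B's outer while loop: skip separators, collect nonempty words
def ghWords : List Char → List (List Char)
  | [] => []
  | c :: t =>
    if githubSep c then ghWords t
    else
      let p := ghWord (c :: t)
      if p.1.isEmpty then ghWords p.2 else p.1 :: ghWords p.2
termination_by t => t.length
decreasing_by
  · simp
  all_goals
    show (ghWord (c :: t)).2.length < (c :: t).length
    simp only [ghWord]
    rw [if_neg (by assumption)]
    exact Nat.lt_succ_of_le (ghWord_rest_le t)

def github_slug_alt (text : String) : String :=
  -- unicodedata.normalize("NFKD", ·) is the identity on the ASCII domain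
  let t := PySem.Chars.strip (PySem.Chars.lower text.toList)
  String.ofList (PySem.Chars.join ['-'] (ghWords t))

-- ===== PRECONDITION & SPEC =====
def Spec_github_slug (text : String) (out : String) : Prop := out = github_slug_alt text
instance (text : String) (out : String) : Decidable (Spec_github_slug text out) := by unfold Spec_github_slug; infer_instance

-- ===== CLAIM (what is proved, stated in full; the proofs are below) =====
def Claim_equal_github_slug : Prop := ∀ (text : String), Dom_github_slug text → Spec_github_slug text (github_slug text)

-- ===== LEMMAS AND PROOFS =====

-- proof-side word-accumulator fold, the bridge between A's fold and B's block scan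
def githubStepB (st : List (List Char) × List Char) (c : Char) : List (List Char) × List Char :=
  if githubSep c then (st.1 ++ [st.2], [])
  else if githubKeep c then (st.1, st.2 ++ [c]) else st

-- the nonempty words accumulated so far
def ghW (ws : List (List Char)) : List (List Char) := ws.filter (fun w => !w.isEmpty)

-- what A's slug_chars buffer looks like in terms of the bridge (words, current-word) state
def ghGlue (ws : List (List Char)) (cur : List Char) : List Char :=
  PySem.Chars.join ['-'] (ghW ws) ++ (if (ghW ws).isEmpty then [] else ['-']) ++ cur

def ghInv (b : List (List Char) × List Char) (a : List Char × Bool) : Prop :=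
  a.1 = ghGlue b.1 b.2 ∧ a.2 = (b.2.isEmpty && !(ghW b.1).isEmpty) ∧
  (∀ w ∈ b.1, ∀ c ∈ w, githubKeep c = true) ∧ (∀ c ∈ b.2, githubKeep c = true)

lemma gh_keep_ne_dash {c : Char} (h : githubKeep c = true) : c ≠ '-' := by
  intro hc; subst hc; simp [githubKeep] at h

lemma gh_join_append_singleton (xs : List (List Char)) (y : List Char) :
    PySem.Chars.join ['-'] (xs ++ [y]) =
      if xs.isEmpty then y else PySem.Chars.join ['-'] xs ++ ['-'] ++ y := by
  induction xs with
  | nil => simp [PySem.Chars.join_singleton]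
  | cons a xs ih =>
    cases xs with
    | nil => simp [PySem.Chars.join_cons_cons, PySem.Chars.join_singleton]
    | cons b xs' =>
      have ih' : PySem.Chars.join ['-'] (b :: (xs' ++ [y])) =
          PySem.Chars.join ['-'] (b :: xs') ++ ['-'] ++ y := by simpa using ih
      simp [PySem.Chars.join_cons_cons, ih', List.append_assoc]

lemma gh_join_ne_nil {v : List Char} (hv : v ≠ []) (V : List (List Char)) :
    PySem.Chars.join ['-'] (v :: V) ≠ [] := by
  cases V with
  | nil => simpa [PySem.Chars.join_singleton] using hv
  | cons b V' =>
    simp only [PySem.Chars.join_cons_cons]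
    intro h
    rcases List.append_eq_nil_iff.1 h with ⟨h1, -⟩
    rcases List.append_eq_nil_iff.1 h1 with ⟨h2, -⟩
    exact hv h2

-- both ends of the joined slug are kept characters
lemma gh_join_ends (V : List (List Char))
    (hV : ∀ w ∈ V, w ≠ []) (hK : ∀ w ∈ V, ∀ c ∈ w, githubKeep c = true) :
    (∀ hd, (PySem.Chars.join ['-'] V).head? = some hd → githubKeep hd = true) ∧
    (∀ lt, (PySem.Chars.join ['-'] V).getLast? = some lt → githubKeep lt = true) := by
  induction V with
  | nil => simp [PySem.Chars.join_nil]
  | cons w V ih =>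
    have hw : w ≠ [] := hV w (by simp)
    have hwK : ∀ c ∈ w, githubKeep c = true := hK w (by simp)
    cases V with
    | nil =>
      constructor
      · intro hd h
        rw [PySem.Chars.join_singleton] at h
        exact hwK hd (List.mem_of_mem_head? h)
      · intro lt h
        rw [PySem.Chars.join_singleton] at h
        exact hwK lt (List.mem_of_getLast? h)
    | cons v V' =>
      have ih' := ih (fun x hx => hV x (by simp [hx])) (fun x hx => hK x (by simp [hx]))
      have hJ : PySem.Chars.join ['-'] (v :: V') ≠ [] := gh_join_ne_nil (hV v (by simp)) V'
      constructor
      · intro hd h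
        rw [PySem.Chars.join_cons_cons] at h
        rw [List.append_assoc, List.head?_append_of_ne_nil _ hw] at h
        exact hwK hd (List.mem_of_mem_head? h)
      · intro lt h
        rw [PySem.Chars.join_cons_cons] at h
        rw [List.getLast?_append_of_ne_nil _ hJ] at h
        exact ih'.2 lt h

lemma gh_strip_noop {l : List Char}
    (h1 : ∀ hd, l.head? = some hd → githubKeep hd = true)
    (h2 : ∀ lt, l.getLast? = some lt → githubKeep lt = true) :
    PySem.Chars.stripChars l ['-'] = l := by
  simp only [PySem.Chars.stripChars]
  cases l with
  | nil => simp
  | cons a t =>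
    have ha : githubKeep a = true := h1 a rfl
    have hd1 : List.dropWhile (fun c => [('-' : Char)].contains c) (a :: t) = a :: t := by
      rw [List.dropWhile_cons]
      simp [gh_keep_ne_dash ha]
    rw [hd1]
    cases hr : (a :: t).reverse with
    | nil => simp at hr
    | cons b r =>
      have hb : githubKeep b = true := by
        apply h2
        rw [← List.head?_reverse, hr]; rfl
      have hbf : ([('-' : Char)].contains b) = false := by simp [gh_keep_ne_dash hb]
      rw [List.dropWhile_cons]
      simp only [hbf, Bool.false_eq_true, if_false]
      rw [← hr, List.reverse_reverse]

lemma gh_strip_trailing {l : List Char}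
    (h1 : ∀ hd, l.head? = some hd → githubKeep hd = true)
    (h2 : ∀ lt, l.getLast? = some lt → githubKeep lt = true) :
    PySem.Chars.stripChars (l ++ ['-']) ['-'] = l := by
  simp only [PySem.Chars.stripChars]
  cases l with
  | nil => decide
  | cons a t =>
    have ha : githubKeep a = true := h1 a rfl
    have hd1 : List.dropWhile (fun c => [('-' : Char)].contains c) ((a :: t) ++ ['-']) = (a :: t) ++ ['-'] := by
      rw [List.cons_append, List.dropWhile_cons]
      simp [gh_keep_ne_dash ha]
    rw [hd1]
    rw [List.reverse_append]
    rw [show (['-'] : List Char).reverse = ['-'] from rfl, List.singleton_append]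
    rw [List.dropWhile_cons]
    rw [if_pos (by decide)]
    cases hr : (a :: t).reverse with
    | nil => simp at hr
    | cons b r =>
      have hb : githubKeep b = true := by
        apply h2
        rw [← List.head?_reverse, hr]; rfl
      have hbf : ([('-' : Char)].contains b) = false := by simp [gh_keep_ne_dash hb]
      rw [List.dropWhile_cons]
      simp only [hbf, Bool.false_eq_true, if_false]
      rw [← hr, List.reverse_reverse]

lemma gh_step (b : List (List Char) × List Char) (a : List Char × Bool) (c : Char)
    (h : ghInv b a) : ghInv (githubStepB b c) (githubStepA a c) := by
  obtain ⟨ws, cur⟩ := b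
  obtain ⟨slug, last⟩ := a
  obtain ⟨h1, h2, h3, h4⟩ := h
  simp only at h1 h2 h3 h4
  by_cases hsep : githubSep c = true
  · simp only [githubStepA, githubStepB, hsep, if_true]
    by_cases hcur : cur = []
    · subst hcur
      have hWW : ghW (ws ++ [[]]) = ghW ws := by simp [ghW, List.filter_append]
      have hstay : ghInv (ws ++ [[]], []) (slug, last) := by
        refine ⟨?_, ?_, ?_, ?_⟩
        · simp only [ghGlue, hWW]; exact h1
        · simp only [hWW]; exact h2
        · intro w hw
          rcases List.mem_append.1 hw with hw | hw
          · exact h3 w hw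
          · simp at hw; subst hw; simp
        · simp
      have hcond : (!slug.isEmpty && !last) = false := by
        by_cases hW : (ghW ws).isEmpty
        · have hs : slug = [] := by
            rw [h1]
            simp [ghGlue, List.isEmpty_iff.1 hW, PySem.Chars.join, List.intercalate]
          simp [hs]
        · have hl : last = true := by rw [h2]; simp [hW]
          simp [hl]
      simp only [hcond, Bool.false_eq_true, if_false]
      exact hstay
    · -- cur ≠ [] : A appends a dash, the bridge closes the word
      have hcurE : cur.isEmpty = false := by simpa using hcur
      have hlast : last = false := by rw [h2]; simp [hcurE]
      have hslugne : slug.isEmpty = false := by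
        rw [h1]
        simp [ghGlue, List.append_eq_nil_iff, hcur]
      have hWc : ghW (ws ++ [cur]) = ghW ws ++ [cur] := by
        simp [ghW, List.filter_append, hcurE]
      simp only [hlast, hslugne, Bool.not_false, Bool.and_self, if_true]
      refine ⟨?_, ?_, ?_, ?_⟩
      · rw [h1]
        simp only [ghGlue, hWc]
        rw [gh_join_append_singleton]
        have hne : (ghW ws ++ [cur]).isEmpty = false := by simp
        simp only [hne, Bool.false_eq_true, if_false, List.append_nil]
        by_cases hW : (ghW ws).isEmpty
        · simp [List.isEmpty_iff.1 hW, PySem.Chars.join, List.intercalate]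
        · simp [hW, List.append_assoc]
      · simp [hWc]
      · intro w hw
        rcases List.mem_append.1 hw with hw | hw
        · exact h3 w hw
        · simp at hw; subst hw; exact h4
      · simp
  · simp only [githubStepA, githubStepB, hsep, Bool.false_eq_true, if_false]
    by_cases hk : githubKeep c = true
    · simp only [hk, if_true]
      refine ⟨?_, ?_, ?_, ?_⟩
      · rw [h1]; simp [ghGlue, List.append_assoc]
      · simp
      · exact h3
      · intro x hx
        rcases List.mem_append.1 hx with hx | hx
        · exact h4 x hx
        · simp at hx; subst hx; exact hk
    · simp only [hk, Bool.false_eq_true, if_false]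
      exact ⟨h1, h2, h3, h4⟩

lemma gh_fold (t : List Char) :
    ∀ (b : List (List Char) × List Char) (a : List Char × Bool), ghInv b a →
      ghInv (t.foldl githubStepB b) (t.foldl githubStepA a) := by
  induction t with
  | nil => intro b a h; simpa using h
  | cons c t ih =>
    intro b a h
    simp only [List.foldl_cons]
    exact ih _ _ (gh_step b a c h)

lemma gh_final (b : List (List Char) × List Char) (a : List Char × Bool) (h : ghInv b a) :
    PySem.Chars.stripChars a.1 ['-'] =
      PySem.Chars.join ['-'] ((b.1 ++ [b.2]).filter (fun w => !w.isEmpty)) := by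
  obtain ⟨ws, cur⟩ := b
  obtain ⟨slug, last⟩ := a
  obtain ⟨h1, -, h3, h4⟩ := h
  simp only at h1 h3 h4 ⊢
  have hWmem : ∀ w ∈ ghW ws, w ≠ [] := by
    intro w hw; have := List.of_mem_filter hw; simpa [List.isEmpty_eq_false_iff] using this
  have hWK : ∀ w ∈ ghW ws, ∀ c ∈ w, githubKeep c = true := by
    intro w hw; exact h3 w (List.mem_of_mem_filter hw)
  have hends := gh_join_ends (ghW ws) hWmem hWK
  have hWapp : (ws ++ [cur]).filter (fun w => !w.isEmpty) =
      ghW ws ++ (if cur.isEmpty then [] else [cur]) := by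
    simp [ghW, List.filter_append]
    cases cur <;> simp
  rw [hWapp, h1]
  by_cases hcur : cur = []
  · subst hcur
    simp only [List.isEmpty_nil, if_true, List.append_nil]
    by_cases hW : (ghW ws).isEmpty
    · simp [ghGlue, List.isEmpty_iff.1 hW, PySem.Chars.join, List.intercalate,
        PySem.Chars.stripChars]
    · simp only [ghGlue, hW, List.append_nil]
      exact gh_strip_trailing hends.1 hends.2
  · rw [if_neg (by simpa using hcur)]
    rw [gh_join_append_singleton]
    by_cases hW : (ghW ws).isEmpty
    · simp only [ghGlue, List.isEmpty_iff.1 hW]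
      simp only [PySem.Chars.join, List.intercalate, List.intersperse, List.flatten,
        List.nil_append]
      exact gh_strip_noop
        (fun hd hh => h4 hd (List.mem_of_mem_head? hh))
        (fun lt hh => h4 lt (List.mem_of_getLast? hh))
    · simp only [ghGlue, hW]
      have hJne : PySem.Chars.join ['-'] (ghW ws) ≠ [] := by
        cases hg : ghW ws with
        | nil => simp [hg] at hW
        | cons v V' => exact hg ▸ gh_join_ne_nil (hWmem v (by rw [hg]; simp)) V'
      apply gh_strip_noop
      · intro hd hh
        rw [List.append_assoc, List.head?_append_of_ne_nil _ hJne] at hh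
        exact hends.1 hd hh
      · intro lt hh
        rw [List.getLast?_append_of_ne_nil _ hcur] at hh
        exact h4 lt (List.mem_of_getLast? hh)

-- the bridge fold, ws forgotten: the nonempty words it will still emit
def ghAux (cur : List Char) : List Char → List (List Char)
  | [] => [cur].filter (fun w => !w.isEmpty)
  | c :: t =>
    if githubSep c then [cur].filter (fun w => !w.isEmpty) ++ ghAux [] t
    else ghAux (if githubKeep c then cur ++ [c] else cur) t

lemma gh_foldB_out (t : List Char) :
    ∀ (ws : List (List Char)) (cur : List Char),
      ((t.foldl githubStepB (ws, cur)).1 ++ [(t.foldl githubStepB (ws, cur)).2]).filter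
          (fun w => !w.isEmpty) =
        ws.filter (fun w => !w.isEmpty) ++ ghAux cur t := by
  induction t with
  | nil =>
    intro ws cur
    simp [ghAux, List.filter_append]
  | cons c t ih =>
    intro ws cur
    simp only [List.foldl_cons, githubStepB, ghAux]
    by_cases hsep : githubSep c = true
    · simp only [hsep, if_true]
      rw [ih]
      simp [List.filter_append, List.append_assoc]
    · simp only [hsep, Bool.false_eq_true, if_false]
      by_cases hk : githubKeep c = true
      · simp only [hk, if_true]; exact ih _ _
      · simp only [hk, Bool.false_eq_true, if_false]; exact ih _ _

lemma gh_words_eq (t : List Char) :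
    ghWords t = [(ghWord t).1].filter (fun w => !w.isEmpty) ++ ghWords (ghWord t).2 := by
  cases t with
  | nil => simp [ghWords, ghWord]
  | cons c t =>
    by_cases hsep : githubSep c = true
    · rw [show ghWord (c :: t) = ([], c :: t) by simp [ghWord, hsep]]
      simp
    · rw [show ghWords (c :: t) =
          (if (ghWord (c :: t)).1.isEmpty then ghWords (ghWord (c :: t)).2
           else (ghWord (c :: t)).1 :: ghWords (ghWord (c :: t)).2) by
        rw [ghWords]; simp [hsep]]
      by_cases he : (ghWord (c :: t)).1.isEmpty <;> simp [he]

lemma gh_aux_eq_words : ∀ (n : ℕ) (t : List Char), t.length ≤ n → ∀ cur,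
    ghAux cur t =
      [cur ++ (ghWord t).1].filter (fun w => !w.isEmpty) ++ ghWords (ghWord t).2 := by
  intro n
  induction n with
  | zero =>
    intro t ht cur
    have : t = [] := List.eq_nil_of_length_eq_zero (Nat.le_zero.1 ht)
    subst this
    simp [ghAux, ghWord, ghWords]
  | succ n ih =>
    intro t ht cur
    cases t with
    | nil => simp [ghAux, ghWord, ghWords]
    | cons c t =>
      have htn : t.length ≤ n := Nat.lt_succ_iff.1 (Nat.lt_of_lt_of_le (by simp) ht)
      by_cases hsep : githubSep c = true
      · rw [show ghWord (c :: t) = ([], c :: t) by simp [ghWord, hsep]]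
        simp only [ghAux, hsep, if_true, List.append_nil]
        rw [ih t htn []]
        simp only [List.nil_append]
        rw [← gh_words_eq t]
        rw [show ghWords (c :: t) = ghWords t by rw [ghWords]; simp [hsep]]
      · rw [show ghWord (c :: t) =
            (if githubKeep c then c :: (ghWord t).1 else (ghWord t).1, (ghWord t).2) by
          simp [ghWord, hsep]]
        simp only [ghAux, hsep, Bool.false_eq_true, if_false]
        rw [ih t htn _]
        by_cases hk : githubKeep c = true <;> simp [hk, List.append_assoc]

lemma gh_aux_nil (t : List Char) : ghAux [] t = ghWords t := by
  rw [gh_aux_eq_words t.length t le_rfl []]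
  simp only [List.nil_append]
  exact (gh_words_eq t).symm

-- ===== VERDICT (by name: the statement is the Claim_ definition above) =====
theorem github_slug_spec : Claim_equal_github_slug := by
  intro text _
  unfold Spec_github_slug github_slug github_slug_alt
  have h0 : ghInv (([], []) : List (List Char) × List Char) (([], false) : List Char × Bool) := by
    refine ⟨by simp [ghGlue, ghW, PySem.Chars.join, List.intercalate], by simp [ghW], by simp, by simp⟩
  have h := gh_fold (PySem.Chars.strip (PySem.Chars.lower text.toList)) _ _ h0
  have hfin := gh_final _ _ h
  have hwords := gh_foldB_out (PySem.Chars.strip (PySem.Chars.lower text.toList)) [] []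
  simp only [List.filter_nil, List.nil_append] at hwords
  rw [gh_aux_nil] at hwords
  simp only [hfin, hwords]
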